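-- pv_equiv track=rewrite | github.com/JCass45/Interview-Prep | attendance.py | suspend
-- ===== SOURCE A (Python) =====
-- def suspend(record: list):
--     total_absences = 0
--     consecutive_absences = 0
--
--     for item in record:
--         if item is True:
--             total_absences += 1
--             consecutive_absences += 1
--             if consecutive_absences == 3 or total_absences == 7:
--                 return True
--
--         else:
--             consecutive_absences = 0
--
--     return False
-- ===== SOURCE B (Python) =====
-- def suspend(record: list):
--     # Staged: boolean mask, sliding 3-window via zip of shifted lists, then thresholds.
--     absences = [x is True for x in record]
--     has_triple = any(a and b and c for a, b, c in zip(absences, absences[1:], absences[2:]))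
--     return has_triple or sum(absences) >= 7
-- ===== Notes on version B (the rewrite author's own statement) =====
-- stated objective: alternative
-- what changed: B builds a boolean absence mask, detects a 3-long run as a sliding window of width 3 via zip of the mask with its two shifts (no run counter, no early exit), and separately sums the mask for the >=7 test.
import Mathlib
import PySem

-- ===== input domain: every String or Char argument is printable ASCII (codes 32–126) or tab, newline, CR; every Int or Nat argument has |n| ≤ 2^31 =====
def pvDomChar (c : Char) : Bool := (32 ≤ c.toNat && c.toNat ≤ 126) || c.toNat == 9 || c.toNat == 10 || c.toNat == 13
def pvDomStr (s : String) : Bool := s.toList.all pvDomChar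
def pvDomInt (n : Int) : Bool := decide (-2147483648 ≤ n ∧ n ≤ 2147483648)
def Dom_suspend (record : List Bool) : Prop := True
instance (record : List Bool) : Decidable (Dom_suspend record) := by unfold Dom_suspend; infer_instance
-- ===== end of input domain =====

-- B replaces A's stateful early-exit scan by a staged formulation: a boolean mask,
-- a sliding 3-window (zip of the mask with its two shifts) for the run test, and a
-- sum of the mask for the total test; objective: alternative decomposition.

-- ===== PORT A =====
-- A's loop with early return: state (total_absences, consecutive_absences)
def suspendLoop : List Bool → Nat → Nat → Bool
  | [], _, _ => false
  | item :: rest, total, consec =>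
      if item then
        if consec + 1 == 3 || total + 1 == 7 then true
        else suspendLoop rest (total + 1) (consec + 1)
      else suspendLoop rest total 0

def suspend (record : List Bool) : Bool := suspendLoop record 0 0

-- ===== PORT B =====
-- B: mask, zip with the two shifted slices, any 3-window all-true, sum >= 7
def suspend_alt (record : List Bool) : Bool :=
  let absences := record.map (fun x => x)
  let hasTriple :=
    (absences.zip ((PySem.List.slice absences (some 1) none).zip
                   (PySem.List.slice absences (some 2) none))).any
      (fun p => p.1 && p.2.1 && p.2.2)
  hasTriple || decide (7 ≤ absences.foldl (fun a b => a + (if b then (1:Nat) else 0)) 0)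

-- ===== PRECONDITION & SPEC =====
def Spec_suspend (record : List Bool) (out : Bool) : Prop := out = suspend_alt record
instance (record : List Bool) (out : Bool) : Decidable (Spec_suspend record out) := by unfold Spec_suspend; infer_instance

-- ===== CLAIM =====
def Claim_equal_suspend : Prop := ∀ (record : List Bool), Dom_suspend record → Spec_suspend record (suspend record)

-- ===== LEMMAS AND PROOFS =====

-- window predicate: some 3 consecutive elements are all true
def W : List Bool → Bool
  | a :: b :: c :: rest => (a && b && c) || W (b :: c :: rest)
  | _ => false

def cnt (l : List Bool) : Nat := (l.filter id).length

theorem W_false_cons (l : List Bool) : W (false :: l) = W l := by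
  match l with
  | [] => rfl
  | [_] => rfl
  | _ :: _ :: _ => simp [W]

theorem W_any_false (x : Bool) (l : List Bool) : W (x :: false :: l) = W (false :: l) := by
  match l with
  | [] => rfl
  | _ :: _ => simp [W]

-- A's loop equals the disjunction of the two staged tests
theorem loopA_eq (l : List Bool) : ∀ t r, t ≤ 6 → r ≤ 2 →
    suspendLoop l t r = (W (List.replicate r true ++ l) || decide (7 ≤ t + cnt l)) := by
  induction l with
  | nil =>
      intro t r ht hr
      interval_cases r <;> simp [suspendLoop, W, cnt] <;> omega
  | cons b rest ih =>
      intro t r ht hr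
      by_cases hb : b
      · subst hb
        by_cases hstop : r + 1 = 3 ∨ t + 1 = 7
        · have : suspendLoop (true :: rest) t r = true := by
            simp only [suspendLoop, if_true]
            rcases hstop with h | h <;> simp [h]
          rw [this]
          rcases hstop with h | h
          · have hr2 : r = 2 := by omega
            subst hr2
            simp [List.replicate, W]
          · have : 7 ≤ t + cnt (true :: rest) := by simp [cnt]; omega
            simp [this]
        · push_neg at hstop
          have h3 : ¬ (r + 1 = 3) := hstop.1
          have h7 : ¬ (t + 1 = 7) := hstop.2
          have hs : suspendLoop (true :: rest) t r = suspendLoop rest (t+1) (r+1) := by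
            simp only [suspendLoop, if_true]
            rw [if_neg]
            simp only [Bool.or_eq_true, beq_iff_eq]
            omega
          rw [hs, ih (t+1) (r+1) (by omega) (by omega)]
          have hrep : List.replicate r true ++ true :: rest
              = List.replicate (r+1) true ++ rest := by
            rw [List.replicate_succ']
            simp
          rw [hrep]
          have : t + 1 + cnt rest = t + cnt (true :: rest) := by simp [cnt]; omega
          rw [this]
      · have hb' : b = false := by simpa using hb
        subst hb'
        have hs : suspendLoop (false :: rest) t r = suspendLoop rest t 0 := by
          simp [suspendLoop]
        rw [hs, ih t 0 ht (by omega)]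
        have hW : W (List.replicate r true ++ false :: rest) = W rest := by
          interval_cases r
          · simpa using W_false_cons rest
          · simp only [List.replicate, List.cons_append, List.nil_append]
            rw [W_any_false, W_false_cons]
          · simp only [List.replicate, List.cons_append, List.nil_append]
            have h1 : W (true :: true :: false :: rest) = W (true :: false :: rest) := by
              simp [W]
            rw [h1, W_any_false, W_false_cons]
        have hc : cnt (false :: rest) = cnt rest := by simp [cnt]
        rw [hW, hc]
        simp

-- B's zip-window any equals W
theorem zipAny_eq_W (l : List Bool) :
    ((l.zip ((l.drop 1).zip (l.drop 2))).any (fun p => p.1 && p.2.1 && p.2.2)) = W l := by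
  match l with
  | [] => rfl
  | [_] => rfl
  | [_, _] => rfl
  | a :: b :: c :: rest =>
      have ih := zipAny_eq_W (b :: c :: rest)
      simp only [List.drop, List.zip_cons_cons, List.any_cons, W] at *
      rw [ih]

-- B's fold equals the count
theorem fold_eq_cnt (l : List Bool) : ∀ n,
    l.foldl (fun a b => a + (if b then (1:Nat) else 0)) n = n + cnt l := by
  induction l with
  | nil => intro n; simp [cnt]
  | cons b rest ih =>
      intro n
      cases b <;> simp [List.foldl, ih, cnt] <;> omega

theorem alt_eq (record : List Bool) :
    suspend_alt record = (W record || decide (7 ≤ cnt record)) := by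
  unfold suspend_alt
  simp only [List.map_id', PySem.List.slice_from_one]
  rw [PySem.List.slice_from record (by norm_num : (0:Int) ≤ 2)]
  have h2 : ((2:Int)).toNat = 2 := rfl
  have h1 : record.tail = record.drop 1 := by simp
  rw [h2, h1, zipAny_eq_W, fold_eq_cnt]
  simp

-- ===== VERDICT =====
theorem suspend_spec : Claim_equal_suspend := by
  intro record _
  show suspend record = suspend_alt record
  rw [alt_eq record]
  simpa [W_false_cons] using loopA_eq record 0 0 (by omega) (by omega)
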